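-- pv_equiv track=rewrite | github.com/MathieuBrillard/le_tavernier | MacGybot/commands/calendrier/gen_cal.py | week_cal
-- ===== SOURCE A (Python) =====
-- def week_cal(cal: str, current_day: int) -> str:
--     """Function used to transform a HTML month calendar into a week calendar.
--
--     Args:
--         `cal`(str): the html calendar to transform.
--         `current_day`(int): the current day to select the current week.
--
--     Returns:
--         `str`: the calendar transformed.
--     """
--     lines = cal.splitlines()
--     w = "" # string to store the line of the desired week
--     for line in lines: # check each lines for the current day
--         if line.__contains__(f">{current_day}<"):
--             w = line
--     ## build the week calendar ##
--     new_cal = lines[0] + "\n" + lines[1] + "\n" + lines[2] + "\n" + w + "\n" + lines[-1]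
--     return new_cal
-- ===== SOURCE B (Python) =====
-- def week_cal(cal: str, current_day: int) -> str:
--     needle = f">{current_day}<"
--     p = cal.rfind(needle)
--     if p < 0:
--         w = ""
--     else:
--         head, tail = cal[:p], cal[p:]
--         # the line containing position p = trailing non-break run of head + leading non-break run of tail
--         back = []
--         for c in reversed(head):
--             if c in "\n\r":
--                 break
--             back.append(c)
--         fwd = []
--         for c in tail:
--             if c in "\n\r":
--                 break
--             fwd.append(c)
--         w = "".join(reversed(back)) + "".join(fwd)
--     lines = cal.splitlines()
--     return lines[0] + "\n" + lines[1] + "\n" + lines[2] + "\n" + w + "\n" + lines[-1]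
-- ===== Notes on version B (the rewrite author's own statement) =====
-- stated objective: alternative
-- what changed: Instead of splitting into lines and testing every line for the marker, B locates the last occurrence of ">{day}<" with a single rfind over the raw string and reconstructs the enclosing line by scanning out to the nearest line-break characters on each side.
import Mathlib
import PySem

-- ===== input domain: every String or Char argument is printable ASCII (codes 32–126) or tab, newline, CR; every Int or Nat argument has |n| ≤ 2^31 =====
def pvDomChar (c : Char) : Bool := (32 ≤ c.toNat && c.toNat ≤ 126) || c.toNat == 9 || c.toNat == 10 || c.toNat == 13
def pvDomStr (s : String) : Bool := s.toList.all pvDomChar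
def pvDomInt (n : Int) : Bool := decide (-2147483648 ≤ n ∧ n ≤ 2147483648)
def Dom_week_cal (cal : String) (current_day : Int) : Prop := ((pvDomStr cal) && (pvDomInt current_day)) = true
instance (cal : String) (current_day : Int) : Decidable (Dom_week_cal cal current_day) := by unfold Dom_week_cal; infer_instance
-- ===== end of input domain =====

-- B finds the last occurrence of ">{day}<" with one rfind over the raw string and rebuilds the
-- surrounding line from the break-character boundaries, instead of scanning every line for the
-- marker (alternative algorithm; the five-line assembly is unchanged).

-- ===== PORT A =====
-- lines[i].getD "" is only read under Pre_ (≥ 3 lines), where Python does not raise.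
def week_cal (cal : String) (current_day : Int) : String :=
  let lines := PySem.Str.splitlines cal
  let w := lines.foldl
    (fun w line => if PySem.Str.isIn (">" ++ PySem.Int.toStr current_day ++ "<") line then line else w) ""
  ((PySem.List.pyGet? lines 0).getD "") ++ "\n" ++ ((PySem.List.pyGet? lines 1).getD "") ++ "\n"
    ++ ((PySem.List.pyGet? lines 2).getD "") ++ "\n" ++ w ++ "\n"
    ++ ((PySem.List.pyGet? lines (-1)).getD "")

-- ===== PORT B =====
-- `c not in "\n\r"` from Source B's two break-at-line-boundary loops
def pvNotBrk (c : Char) : Bool := !(c == '\n' || c == '\r')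

-- Port of Source B, on code points (Python str indices are code points).  The two for/break loops
-- that collect the non-break run backwards from p and forwards from p are the takeWhile
-- recursions over head.reverse and tail; "".join(reversed(back)) is back.reverse.
def week_cal_alt (cal : String) (current_day : Int) : String :=
  let s := cal.toList
  let needle := ['>'] ++ (PySem.Int.toStr current_day).toList ++ ['<']
  let p := PySem.Chars.rfind s needle
  let w : String :=
    if p < 0 then "" else
      let back := (s.take p.toNat).reverse.takeWhile pvNotBrk
      let fwd := (s.drop p.toNat).takeWhile pvNotBrk
      String.ofList (back.reverse ++ fwd)
  let lines := PySem.Str.splitlines cal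
  ((PySem.List.pyGet? lines 0).getD "") ++ "\n" ++ ((PySem.List.pyGet? lines 1).getD "") ++ "\n"
    ++ ((PySem.List.pyGet? lines 2).getD "") ++ "\n" ++ w ++ "\n"
    ++ ((PySem.List.pyGet? lines (-1)).getD "")

-- ===== PRECONDITION & SPEC =====
-- Pre_ excludes exactly the inputs where A raises IndexError: calendars with fewer than 3 lines.
def Pre_week_cal (cal : String) (current_day : Int) : Prop :=
  3 ≤ (PySem.Str.splitlines cal).length
instance (cal : String) (current_day : Int) : Decidable (Pre_week_cal cal current_day) := by
  unfold Pre_week_cal; infer_instance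

def pvWitness_week_cal : String × Int := ("a\nb\nc\n>5<\nz", 5)

def Spec_week_cal (cal : String) (current_day : Int) (out : String) : Prop := out = week_cal_alt cal current_day
instance (cal : String) (current_day : Int) (out : String) : Decidable (Spec_week_cal cal current_day out) := by unfold Spec_week_cal; infer_instance

-- ===== CLAIM (what is proved, stated in full; the proofs are below) =====
def Claim_equal_week_cal : Prop := ∀ (cal : String) (current_day : Int), Dom_week_cal cal current_day → Pre_week_cal cal current_day → Spec_week_cal cal current_day (week_cal cal current_day)

-- ===== LEMMAS AND PROOFS =====

-- the break predicate splitlines actually uses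
def isB0 (c : Char) : Bool :=
  have n := c.toNat
  decide (n = 10) || decide (n = 13) || decide (n = 11) || decide (n = 12) || decide (n = 28) || decide (n = 29) ||
    decide (n = 30) || decide (n = 133) || decide (n = 8232) || decide (n = 8233)

theorem splitlines_eq_go (s : List Char) :
    PySem.Chars.splitlines s = PySem.Chars.splitlines.go isB0 s [] [] := rfl

theorem go_nil (cur : List Char) (acc : List (List Char)) :
    PySem.Chars.splitlines.go isB0 [] cur acc
      = if cur.isEmpty then acc.reverse else (cur.reverse :: acc).reverse := by
  simp [PySem.Chars.splitlines.go]

theorem go_crlf (rest cur acc) :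
    PySem.Chars.splitlines.go isB0 ('\r'::'\n'::rest) cur acc
      = PySem.Chars.splitlines.go isB0 rest [] (cur.reverse :: acc) := by
  simp [PySem.Chars.splitlines.go]

theorem go_cons (c : Char) (hc : isB0 c = false) (rest cur acc) :
    PySem.Chars.splitlines.go isB0 (c::rest) cur acc
      = PySem.Chars.splitlines.go isB0 rest (c::cur) acc := by
  have hr : c ≠ '\r' := by rintro rfl; simp [isB0] at hc
  rw [PySem.Chars.splitlines.go.eq_def]
  rcases rest with _ | ⟨c2, rest⟩
  · simp [hc]
  · split
    · rename_i heq; exact absurd heq (by simp)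
    · rename_i rest' heq; injection heq with h1 _; exact absurd h1 hr
    · rename_i _ heq; injection heq with h1 h2; subst h1; subst h2
      simp [isB0] at hc; simp; intro h; simp [isB0] at h; omega

theorem go_brk (c : Char) (hc : isB0 c = true) (hr : c ≠ '\r') (rest cur acc) :
    PySem.Chars.splitlines.go isB0 (c::rest) cur acc
      = PySem.Chars.splitlines.go isB0 rest [] (cur.reverse :: acc) := by
  rw [PySem.Chars.splitlines.go.eq_def]
  rcases rest with _ | ⟨c2, rest⟩
  · simp [hc]
  · split
    · rename_i heq; exact absurd heq (by simp)
    · rename_i rest' heq; injection heq with h1 _; exact absurd h1 hr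
    · rename_i _ heq; injection heq with h1 h2; subst h1; subst h2
      simp [isB0] at hc; simp; intro h; simp [isB0] at h; omega

theorem go_cr (rest cur acc) (h : rest.head? ≠ some '\n') :
    PySem.Chars.splitlines.go isB0 ('\r'::rest) cur acc
      = PySem.Chars.splitlines.go isB0 rest [] (cur.reverse :: acc) := by
  rw [PySem.Chars.splitlines.go.eq_def]
  rcases rest with _ | ⟨c2, rest⟩
  · simp [isB0]
  · have hc2 : c2 ≠ '\n' := by simpa using h
    split
    · rename_i heq; exact absurd heq (by simp)
    · rename_i rest' heq; injection heq with _ h2; injection h2 with h2 _; exact absurd h2 hc2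
    · rename_i _ heq; injection heq with h1 h2; subst h2; rw [← h1]; simp [isB0]

-- the accumulator is only ever prepended to the final answer
theorem go_acc (t cur : List Char) (acc : List (List Char)) :
    PySem.Chars.splitlines.go isB0 t cur acc
      = acc.reverse ++ PySem.Chars.splitlines.go isB0 t cur [] := by
  rcases t with _ | ⟨c, rest⟩
  · rw [go_nil, go_nil]; split <;> simp
  · by_cases hb : isB0 c = true
    · by_cases hr : c = '\r'
      · subst hr
        rcases hh : rest.head? with _ | c2
        · have hne : rest.head? ≠ some '\n' := by rw [hh]; simp
          rw [go_cr _ _ _ hne, go_cr _ _ _ hne, go_acc rest [] (cur.reverse :: acc),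
            go_acc rest [] [cur.reverse]]
          simp
        · by_cases h2 : c2 = '\n'
          · subst h2
            rcases rest with _ | ⟨c3, rest⟩
            · simp at hh
            · obtain rfl : c3 = '\n' := by simpa using hh
              rw [go_crlf, go_crlf, go_acc rest [] (cur.reverse :: acc),
                go_acc rest [] [cur.reverse]]
              simp
          · have hne : rest.head? ≠ some '\n' := by rw [hh]; simp [h2]
            rw [go_cr _ _ _ hne, go_cr _ _ _ hne, go_acc rest [] (cur.reverse :: acc),
              go_acc rest [] [cur.reverse]]
            simp
      · rw [go_brk c hb hr, go_brk c hb hr, go_acc rest [] (cur.reverse :: acc),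
          go_acc rest [] [cur.reverse]]
        simp
    · have hb' : isB0 c = false := by simpa using hb
      rw [go_cons c hb', go_cons c hb', go_acc rest (c::cur) acc]
termination_by t.length

-- a run of non-break characters is folded into the current line
theorem go_run (l t cur : List Char) (acc : List (List Char)) (hl : ∀ c ∈ l, isB0 c = false) :
    PySem.Chars.splitlines.go isB0 (l ++ t) cur acc
      = PySem.Chars.splitlines.go isB0 t (l.reverse ++ cur) acc := by
  induction l generalizing cur with
  | nil => simp
  | cons c l ih =>
    rw [List.cons_append, go_cons c (hl c (by simp)), ih (c::cur) (fun x hx => hl x (by simp [hx]))]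
    simp

theorem splitlines_run (l : List Char) (hl : ∀ c ∈ l, isB0 c = false) :
    PySem.Chars.splitlines l = if l = [] then [] else [l] := by
  have h := go_run l [] [] [] hl
  rw [splitlines_eq_go]
  rw [show l ++ ([] : List Char) = l from by simp] at h
  rw [h, go_nil]
  rcases eq_or_ne l [] with rfl | hne
  · simp
  · simp [hne]

-- peeling one full line with its terminator off the front
theorem splitlines_line (l d rest : List Char) (hl : ∀ c ∈ l, isB0 c = false)
    (hd : d = ['\n'] ∨ d = ['\r','\n'] ∨ (d = ['\r'] ∧ rest.head? ≠ some '\n')) :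
    PySem.Chars.splitlines (l ++ (d ++ rest)) = l :: PySem.Chars.splitlines rest := by
  rw [splitlines_eq_go, go_run l (d ++ rest) [] [] hl]
  have step : PySem.Chars.splitlines.go isB0 (d ++ rest) (l.reverse ++ []) []
      = PySem.Chars.splitlines.go isB0 rest [] [(l.reverse ++ []).reverse] := by
    rcases hd with rfl | rfl | ⟨rfl, hne⟩
    · exact go_brk '\n' (by decide) (by decide) rest _ []
    · exact go_crlf rest _ []
    · exact go_cr rest _ [] hne
  rw [step, go_acc rest [] _, splitlines_eq_go rest]
  simp

-- on the ASCII domain the only break characters are '\n' and '\r'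
theorem beq_char_toNat (c d : Char) : (c == d) = decide (c.toNat = d.toNat) := by
  apply Bool.eq_iff_iff.mpr
  simp only [beq_iff_eq, decide_eq_true_eq]
  constructor
  · rintro rfl; rfl
  · intro h
    exact Char.ext (UInt32.toNat_inj.mp h)

theorem isB0_of_dom (c : Char) (hdom : pvDomChar c = true) :
    isB0 c = !(pvNotBrk c) := by
  have h10 : (c == '\n') = decide (c.toNat = 10) := by
    rw [beq_char_toNat, show '\n'.toNat = 10 from rfl]
  have h13 : (c == '\r') = decide (c.toNat = 13) := by
    rw [beq_char_toNat, show '\r'.toNat = 13 from rfl]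
  have hn : (32 ≤ c.toNat ∧ c.toNat ≤ 126) ∨ c.toNat = 9 ∨ c.toNat = 10 ∨ c.toNat = 13 := by
    simp only [pvDomChar, Bool.or_eq_true, Bool.and_eq_true, decide_eq_true_eq,
      Nat.beq_eq_true_eq] at hdom
    tauto
  simp only [isB0, pvNotBrk, h10, h13, Bool.not_not]
  rw [decide_eq_false (show ¬ c.toNat = 11 by omega),
      decide_eq_false (show ¬ c.toNat = 12 by omega),
      decide_eq_false (show ¬ c.toNat = 28 by omega),
      decide_eq_false (show ¬ c.toNat = 29 by omega),
      decide_eq_false (show ¬ c.toNat = 30 by omega),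
      decide_eq_false (show ¬ c.toNat = 133 by omega),
      decide_eq_false (show ¬ c.toNat = 8232 by omega),
      decide_eq_false (show ¬ c.toNat = 8233 by omega)]
  simp

theorem notBrk_false_iff (c : Char) : pvNotBrk c = false ↔ (c = '\n' ∨ c = '\r') := by
  simp only [pvNotBrk, Bool.not_eq_false', Bool.or_eq_true, beq_iff_eq]

-- ### rfind characterisation ###

theorem rfind_go_zero (s sub : List Char) :
    PySem.Chars.rfind.go s sub 0 = if sub.isPrefixOf s then 0 else -1 := by
  simp [PySem.Chars.rfind.go]

theorem rfind_go_succ (s sub : List Char) (j : Nat) :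
    PySem.Chars.rfind.go s sub (j+1)
      = if sub.isPrefixOf (s.drop (j+1)) then ((j:Int)+1) else PySem.Chars.rfind.go s sub j := by
  simp [PySem.Chars.rfind.go]

theorem rfind_go_neg_iff (s sub : List Char) (j : Nat) :
    PySem.Chars.rfind.go s sub j = -1 ↔ ∀ i ≤ j, ¬ sub <+: s.drop i := by
  induction j with
  | zero =>
    rw [rfind_go_zero]
    split_ifs with h
    · constructor
      · intro habs; exact absurd habs (by norm_num)
      · intro hall
        exact absurd (by simpa [List.isPrefixOf_iff_prefix] using h) (by simpa using hall 0 le_rfl)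
    · constructor
      · intro _ i hi
        interval_cases i
        simpa [List.isPrefixOf_iff_prefix] using h
      · intro _; rfl
  | succ j ih =>
    rw [rfind_go_succ]
    split_ifs with h
    · constructor
      · intro habs; exact absurd habs (by push_cast; omega)
      · intro hall
        exact absurd (by simpa [List.isPrefixOf_iff_prefix] using h) (hall (j+1) le_rfl)
    · rw [ih]
      constructor
      · intro hall i hi
        rcases Nat.lt_or_ge i (j+1) with hlt | hge
        · exact hall i (by omega)
        · have : i = j + 1 := by omega
          subst this
          simpa [List.isPrefixOf_iff_prefix] using h
      · intro hall i hi; exact hall i (by omega)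

theorem rfind_go_spec (s sub : List Char) (j : Nat) (h : PySem.Chars.rfind.go s sub j ≠ -1) :
    ∃ q : Nat, PySem.Chars.rfind.go s sub j = (q : Int) ∧ q ≤ j ∧ sub <+: s.drop q ∧
      ∀ i, q < i → i ≤ j → ¬ sub <+: s.drop i := by
  induction j with
  | zero =>
    rw [rfind_go_zero] at h ⊢
    split_ifs at h ⊢ with hp
    · exact ⟨0, rfl, le_rfl, by simpa [List.isPrefixOf_iff_prefix] using hp, by omega⟩
    · exact absurd rfl h
  | succ j ih =>
    rw [rfind_go_succ] at h ⊢
    split_ifs at h ⊢ with hp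
    · refine ⟨j+1, by push_cast; ring, le_rfl, by simpa [List.isPrefixOf_iff_prefix] using hp, ?_⟩
      intro i h1 h2; omega
    · obtain ⟨q, hq, hle, hpre, hmax⟩ := ih h
      refine ⟨q, hq, by omega, hpre, ?_⟩
      intro i h1 h2
      rcases Nat.lt_or_ge i (j+1) with hlt | hge
      · exact hmax i h1 (by omega)
      · have : i = j + 1 := by omega
        subst this
        simpa [List.isPrefixOf_iff_prefix] using hp

theorem drop_no_occ (s sub : List Char) (hsub : sub ≠ []) (i : Nat) (hi : s.length < i) :
    ¬ sub <+: s.drop i := by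
  intro hpre
  rw [List.drop_eq_nil_of_le (by omega)] at hpre
  exact hsub (List.prefix_nil.mp hpre)

theorem rfind_neg_iff (s sub : List Char) (hsub : sub ≠ []) :
    PySem.Chars.rfind s sub = -1 ↔ ∀ i, ¬ sub <+: s.drop i := by
  unfold PySem.Chars.rfind
  rw [rfind_go_neg_iff]
  constructor
  · intro hall i
    rcases Nat.lt_or_ge s.length i with hlt | hle
    · exact drop_no_occ s sub hsub i hlt
    · exact hall i hle
  · intro hall i _; exact hall i

theorem rfind_spec (s sub : List Char) (hsub : sub ≠ []) (h : PySem.Chars.rfind s sub ≠ -1) :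
    ∃ q : Nat, PySem.Chars.rfind s sub = (q : Int) ∧ sub <+: s.drop q ∧
      ∀ i, q < i → ¬ sub <+: s.drop i := by
  unfold PySem.Chars.rfind at h ⊢
  obtain ⟨q, hq, hle, hpre, hmax⟩ := rfind_go_spec s sub s.length h
  refine ⟨q, hq, hpre, ?_⟩
  intro i h1
  rcases Nat.lt_or_ge s.length i with hlt | hle'
  · exact drop_no_occ s sub hsub i hlt
  · exact hmax i h1 hle'

theorem rfind_eq_of (s sub : List Char) (hsub : sub ≠ []) (q : Nat)
    (h1 : sub <+: s.drop q) (h2 : ∀ i, q < i → ¬ sub <+: s.drop i) :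
    PySem.Chars.rfind s sub = (q : Int) := by
  have hne : PySem.Chars.rfind s sub ≠ -1 := by
    rw [Ne, rfind_neg_iff s sub hsub]
    push_neg
    exact ⟨q, h1⟩
  obtain ⟨q', hq', hpre', hmax'⟩ := rfind_spec s sub hsub hne
  have heq : q' = q := by
    rcases Nat.lt_trichotomy q' q with hlt | heq | hgt
    · exact absurd h1 (hmax' q hlt)
    · exact heq
    · exact absurd hpre' (h2 q' hgt)
  rw [hq', heq]

theorem rfind_lt_zero_iff (s sub : List Char) :
    PySem.Chars.rfind s sub < 0 ↔ PySem.Chars.rfind s sub = -1 := by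
  constructor
  · intro hlt
    by_contra hne
    unfold PySem.Chars.rfind at hlt hne
    obtain ⟨q, hq, _, _, _⟩ := rfind_go_spec s sub s.length hne
    rw [hq] at hlt
    omega
  · intro h; rw [h]; norm_num

-- ### occurrences of a break-free needle in l ++ d ++ rest ###

theorem occ_append (sub l d rest : List Char) (hsub : sub ≠ [])
    (hnb : ∀ c ∈ sub, pvNotBrk c = true) (hd : ∀ c ∈ d, pvNotBrk c = false) (hdne : d ≠ [])
    (p : Nat) :
    sub <+: (l ++ (d ++ rest)).drop p ↔
      sub <+: l.drop p ∨ (l.length + d.length ≤ p ∧ sub <+: rest.drop (p - l.length - d.length)) := by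
  have hdlen : 0 < d.length := List.length_pos_iff.mpr hdne
  rcases Nat.lt_or_ge l.length p with hp' | hp
  swap
  · rw [List.drop_append_of_le_length hp]
    constructor
    · intro h
      rcases Nat.lt_or_ge (l.drop p).length sub.length with hlen | hlen
      swap
      · left
        rw [List.prefix_iff_eq_take] at h ⊢
        rw [List.take_append_of_le_length hlen] at h
        exact h
      · exfalso
        have hklt : (l.drop p).length < sub.length := hlen
        have hbound : (l.drop p).length < ((l.drop p) ++ (d ++ rest)).length := by
          rw [List.length_append, List.length_append]; omega
        have h1 : sub[(l.drop p).length]'hklt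
            = ((l.drop p) ++ (d ++ rest))[(l.drop p).length]'hbound := h.getElem hklt
        rw [List.getElem_append_right le_rfl] at h1
        have hd0 : 0 < d.length := hdlen
        have h2 : (d ++ rest)[(l.drop p).length - (l.drop p).length]'(by
            simp only [List.length_append]; omega) = d[0]'hd0 := by
          simp only [Nat.sub_self]
          exact List.getElem_append_left hd0
        rw [h2] at h1
        have hmem_sub : sub[(l.drop p).length]'hklt ∈ sub := List.getElem_mem _
        have hmem_d : d[0]'hd0 ∈ d := List.getElem_mem _
        have := hnb _ hmem_sub
        rw [h1, hd _ hmem_d] at this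
        exact Bool.false_ne_true this
    · rintro (h | ⟨hge, _⟩)
      · exact h.trans (List.prefix_append _ _)
      · omega
  · rcases Nat.lt_or_ge p (l.length + d.length) with hp2 | hp2
    · have hlhs : ¬ sub <+: (l ++ (d ++ rest)).drop p := by
        intro h
        have hdrop : (l ++ (d ++ rest)).drop p = d.drop (p - l.length) ++ rest := by
          rw [List.drop_append, List.drop_eq_nil_of_le (by omega), List.nil_append,
            List.drop_append_of_le_length (by omega)]
        rw [hdrop] at h
        have hlen0 : 0 < sub.length := List.length_pos_iff.mpr hsub
        have hdl : 0 < (d.drop (p - l.length)).length := by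
          rw [List.length_drop]; omega
        have hbound : 0 < (d.drop (p - l.length) ++ rest).length := by
          rw [List.length_append]; omega
        have h1 : sub[0]'hlen0 = (d.drop (p - l.length) ++ rest)[0]'hbound := h.getElem hlen0
        rw [List.getElem_append_left hdl] at h1
        have hmem_sub : sub[0]'hlen0 ∈ sub := List.getElem_mem _
        have hmem_d : (d.drop (p - l.length))[0]'hdl ∈ d :=
          List.mem_of_mem_drop (List.getElem_mem _)
        have := hnb _ hmem_sub
        rw [h1, hd _ hmem_d] at this
        exact Bool.false_ne_true this
      constructor
      · intro h; exact absurd h hlhs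
      · rintro (h | ⟨hge, _⟩)
        · rw [List.drop_eq_nil_of_le (by omega)] at h
          exact absurd (List.prefix_nil.mp h) hsub
        · omega
    · have hdrop : (l ++ (d ++ rest)).drop p = rest.drop (p - l.length - d.length) := by
        rw [List.drop_append, List.drop_eq_nil_of_le (by omega), List.nil_append,
          List.drop_append, List.drop_eq_nil_of_le (by omega), List.nil_append]
      rw [hdrop]
      constructor
      · intro h; exact Or.inr ⟨hp2, h⟩
      · rintro (h | ⟨_, h⟩)
        · rw [List.drop_eq_nil_of_le (by omega)] at h
          exact absurd (List.prefix_nil.mp h) hsub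
        · exact h

-- ### takeWhile helpers ###

theorem takeWhile_append_break {p : Char → Bool} (x : List Char) (c : Char) (y : List Char)
    (hc : p c = false) : (x ++ c :: y).takeWhile p = x.takeWhile p := by
  induction x with
  | nil => simp [hc]
  | cons a x ih => by_cases h : p a <;> simp [List.takeWhile_cons, h, ih]

-- the line segment around position p (matches the let-bindings in week_cal_alt)
def segAt (s : List Char) (p : Nat) : List Char :=
  ((s.take p).reverse.takeWhile pvNotBrk).reverse ++ (s.drop p).takeWhile pvNotBrk

theorem segAt_in_line (l z : List Char) (hl : ∀ c ∈ l, pvNotBrk c = true)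
    (hz : z = [] ∨ ∃ c y, z = c :: y ∧ pvNotBrk c = false) (p : Nat) (hp : p ≤ l.length) :
    segAt (l ++ z) p = l := by
  unfold segAt
  rw [List.take_append_of_le_length hp, List.drop_append_of_le_length hp]
  have h1 : (l.take p).reverse.takeWhile pvNotBrk = (l.take p).reverse :=
    List.takeWhile_eq_self_iff.mpr
      (fun c hc => hl c (List.mem_of_mem_take (List.mem_reverse.mp hc)))
  have h2 : (l.drop p).takeWhile pvNotBrk = l.drop p :=
    List.takeWhile_eq_self_iff.mpr (fun c hc => hl c (List.mem_of_mem_drop hc))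
  rcases hz with rfl | ⟨c, y, rfl, hc⟩
  · rw [List.append_nil, h1, h2, List.reverse_reverse, List.take_append_drop]
  · rw [takeWhile_append_break _ c _ hc, h1, h2, List.reverse_reverse, List.take_append_drop]

theorem segAt_shift (l d rest : List Char) (hd : ∀ c ∈ d, pvNotBrk c = false) (hdne : d ≠ [])
    (q : Nat) :
    segAt (l ++ (d ++ rest)) (l.length + d.length + q) = segAt rest q := by
  have hdlen : 0 < d.length := List.length_pos_iff.mpr hdne
  unfold segAt
  have htake : (l ++ (d ++ rest)).take (l.length + d.length + q) = l ++ (d ++ rest.take q) := by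
    rw [List.take_append, List.take_of_length_le (by omega), List.take_append,
      List.take_of_length_le (by omega),
      show l.length + d.length + q - l.length - d.length = q from by omega]
  have hdrop : (l ++ (d ++ rest)).drop (l.length + d.length + q) = rest.drop q := by
    rw [List.drop_append, List.drop_eq_nil_of_le (by omega), List.nil_append,
      List.drop_append, List.drop_eq_nil_of_le (by omega), List.nil_append,
      show l.length + d.length + q - l.length - d.length = q from by omega]
  rw [htake, hdrop]
  obtain ⟨c, t, hct⟩ := List.exists_cons_of_ne_nil (show d.reverse ≠ [] by simpa using hdne)
  have hcd : c ∈ d := by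
    have : c ∈ d.reverse := by rw [hct]; exact List.mem_cons_self
    exact List.mem_reverse.mp this
  have hc : pvNotBrk c = false := hd c hcd
  rw [List.reverse_append, List.reverse_append, hct, List.append_assoc, List.cons_append,
    takeWhile_append_break _ c _ hc]

-- ### the main lemma: A's last-matching-line fold = B's rfind + boundary reconstruction ###

theorem last_step (sub : List Char) (hsub : sub ≠ []) (hnb : ∀ c ∈ sub, pvNotBrk c = true)
    (l d rest : List Char) (hl : ∀ c ∈ l, pvNotBrk c = true)
    (hd : ∀ c ∈ d, pvNotBrk c = false) (hdne : d ≠ [])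
    (hsl : PySem.Chars.splitlines (l ++ (d ++ rest)) = l :: PySem.Chars.splitlines rest)
    (IH : ∀ w0 : List Char,
      (PySem.Chars.splitlines rest).foldl (fun w l => if PySem.Chars.isIn sub l then l else w) w0
        = if PySem.Chars.rfind rest sub = -1 then w0
          else segAt rest (PySem.Chars.rfind rest sub).toNat)
    (w0 : List Char) :
    (PySem.Chars.splitlines (l ++ (d ++ rest))).foldl
        (fun w l => if PySem.Chars.isIn sub l then l else w) w0
      = if PySem.Chars.rfind (l ++ (d ++ rest)) sub = -1 then w0
        else segAt (l ++ (d ++ rest)) (PySem.Chars.rfind (l ++ (d ++ rest)) sub).toNat := by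
  have hdlen : 0 < d.length := List.length_pos_iff.mpr hdne
  have hzshape : d ++ rest = [] ∨ ∃ c y, d ++ rest = c :: y ∧ pvNotBrk c = false := by
    obtain ⟨c, t, hct⟩ := List.exists_cons_of_ne_nil hdne
    refine Or.inr ⟨c, t ++ rest, by rw [hct]; simp, hd c (by rw [hct]; exact List.mem_cons_self)⟩
  rw [hsl, List.foldl_cons, IH]
  by_cases hR : PySem.Chars.rfind rest sub = -1
  · rw [if_pos hR]
    by_cases hil : PySem.Chars.isIn sub l = true
    · obtain ⟨j, hj⟩ := (PySem.Chars.exists_prefix_drop_iff_isIn sub l).mpr hil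
      have hlne : PySem.Chars.rfind l sub ≠ -1 := by
        rw [Ne, rfind_neg_iff l sub hsub]
        push_neg
        exact ⟨j, hj⟩
      obtain ⟨q, hq, hpre, hmax⟩ := rfind_spec l sub hsub hlne
      have hocc : sub <+: (l ++ (d ++ rest)).drop q :=
        (occ_append sub l d rest hsub hnb hd hdne q).mpr (Or.inl hpre)
      have hmaxs : ∀ i, q < i → ¬ sub <+: (l ++ (d ++ rest)).drop i := by
        intro i hi h
        rcases (occ_append sub l d rest hsub hnb hd hdne i).mp h with h' | ⟨_, h'⟩
        · exact hmax i hi h'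
        · exact (rfind_neg_iff rest sub hsub).mp hR _ h'
      have hrs : PySem.Chars.rfind (l ++ (d ++ rest)) sub = (q : Int) :=
        rfind_eq_of _ sub hsub q hocc hmaxs
      have hql : q ≤ l.length := by
        by_contra hgt
        rw [List.drop_eq_nil_of_le (by omega)] at hpre
        exact hsub (List.prefix_nil.mp hpre)
      rw [if_pos hil, hrs, if_neg (show ¬((q : Int) = -1) from by omega), Int.toNat_natCast]
      exact (segAt_in_line l (d ++ rest) hl hzshape q hql).symm
    · have hnone : PySem.Chars.rfind (l ++ (d ++ rest)) sub = -1 := by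
        rw [rfind_neg_iff _ sub hsub]
        intro i h
        rcases (occ_append sub l d rest hsub hnb hd hdne i).mp h with h' | ⟨_, h'⟩
        · exact hil ((PySem.Chars.exists_prefix_drop_iff_isIn sub l).mp ⟨i, h'⟩)
        · exact (rfind_neg_iff rest sub hsub).mp hR _ h'
      rw [if_neg hil, hnone, if_pos rfl]
  · obtain ⟨q, hq, hpre, hmax⟩ := rfind_spec rest sub hsub hR
    have hocc : sub <+: (l ++ (d ++ rest)).drop (l.length + d.length + q) := by
      refine (occ_append sub l d rest hsub hnb hd hdne _).mpr (Or.inr ⟨by omega, ?_⟩)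
      have : l.length + d.length + q - l.length - d.length = q := by omega
      rw [this]
      exact hpre
    have hmaxs : ∀ i, l.length + d.length + q < i → ¬ sub <+: (l ++ (d ++ rest)).drop i := by
      intro i hi h
      rcases (occ_append sub l d rest hsub hnb hd hdne i).mp h with h' | ⟨hge, h'⟩
      · rw [List.drop_eq_nil_of_le (by omega)] at h'
        exact hsub (List.prefix_nil.mp h')
      · exact hmax (i - l.length - d.length) (by omega) h'
    have hrs : PySem.Chars.rfind (l ++ (d ++ rest)) sub = ((l.length + d.length + q : Nat) : Int) :=
      rfind_eq_of _ sub hsub _ hocc hmaxs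
    rw [if_neg hR, hq, Int.toNat_natCast, hrs,
      if_neg (show ¬(((l.length + d.length + q : Nat) : Int) = -1) from by omega),
      Int.toNat_natCast]
    exact (segAt_shift l d rest hd hdne q).symm

theorem lastline_eq_rfind (sub : List Char) (hsub : sub ≠ [])
    (hnb : ∀ c ∈ sub, pvNotBrk c = true) (s : List Char) :
    ∀ (_ : ∀ c ∈ s, pvDomChar c = true) (w0 : List Char),
    (PySem.Chars.splitlines s).foldl (fun w l => if PySem.Chars.isIn sub l then l else w) w0
      = if PySem.Chars.rfind s sub = -1 then w0 else segAt s (PySem.Chars.rfind s sub).toNat := by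
  induction hn : s.length using Nat.strong_induction_on generalizing s with
  | _ n IH =>
  intro hs w0
  obtain ⟨l, r, rfl, hl, hr⟩ : ∃ l r, s = l ++ r ∧ (∀ c ∈ l, pvNotBrk c = true) ∧
      (r = [] ∨ ∃ b r', r = b :: r' ∧ pvNotBrk b = false) := by
    refine ⟨s.takeWhile pvNotBrk, s.dropWhile pvNotBrk, (List.takeWhile_append_dropWhile).symm,
      fun c hc => List.mem_takeWhile_imp hc, ?_⟩
    rcases hdw : s.dropWhile pvNotBrk with _ | ⟨b, r'⟩
    · exact Or.inl rfl
    · refine Or.inr ⟨b, r', rfl, ?_⟩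
      have := List.head?_dropWhile_not pvNotBrk s
      rw [hdw] at this
      simpa using this
  have hlb : ∀ c ∈ l, isB0 c = false := by
    intro c hc
    rw [isB0_of_dom c (hs c (by simp [hc])), hl c hc]
    rfl
  rcases hr with rfl | ⟨b, r', rfl, hb⟩
  · -- no break in s: zero or one line
    rw [List.append_nil]
    rcases eq_or_ne l [] with rfl | hne
    · rw [show PySem.Chars.splitlines [] = [] from rfl]
      have : PySem.Chars.rfind [] sub = -1 := by
        rw [rfind_neg_iff _ sub hsub]
        intro i h
        rw [List.drop_nil] at h
        exact hsub (List.prefix_nil.mp h)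
      rw [this, if_pos rfl]
      rfl
    · rw [splitlines_run l hlb, if_neg hne, List.foldl_cons, List.foldl_nil]
      by_cases hil : PySem.Chars.isIn sub l = true
      · obtain ⟨j, hj⟩ := (PySem.Chars.exists_prefix_drop_iff_isIn sub l).mpr hil
        have hlne : PySem.Chars.rfind l sub ≠ -1 := by
          rw [Ne, rfind_neg_iff l sub hsub]
          push_neg
          exact ⟨j, hj⟩
        obtain ⟨q, hq, hpre, hmax⟩ := rfind_spec l sub hsub hlne
        have hql : q ≤ l.length := by
          by_contra hgt
          rw [List.drop_eq_nil_of_le (by omega)] at hpre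
          exact hsub (List.prefix_nil.mp hpre)
        rw [if_pos hil, hq, if_neg (show ¬((q : Int) = -1) from by omega), Int.toNat_natCast]
        have := segAt_in_line l [] hl (Or.inl rfl) q hql
        rw [List.append_nil] at this
        exact this.symm
      · have hnone : PySem.Chars.rfind l sub = -1 := by
          rw [rfind_neg_iff _ sub hsub]
          intro i h
          exact hil ((PySem.Chars.exists_prefix_drop_iff_isIn sub l).mp ⟨i, h⟩)
        rw [if_neg hil, hnone, if_pos rfl]
  · -- r = b :: r' with b a break character
    have hbd : b = '\n' ∨ b = '\r' := (notBrk_false_iff b).mp hb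
    rcases hbd with rfl | rfl
    · -- delimiter "\n"
      have hsl := splitlines_line l ['\n'] r' hlb (Or.inl rfl)
      have hlt : r'.length < n := by
        rw [← hn]; simp only [List.length_append, List.length_cons]; omega
      have := last_step sub hsub hnb l ['\n'] r' hl (by intro c hc; simp at hc; subst hc; rfl)
        (by simp) (by simpa using hsl)
        (fun w1 => IH r'.length hlt r' rfl (fun c hc => hs c (by simp [hc])) w1) w0
      simpa using this
    · -- b = '\r': carriage return, possibly followed by '\n'
      rcases hr'' : r' with _ | ⟨b2, r''⟩
      · subst hr''
        have hsl := splitlines_line l ['\r'] [] hlb (Or.inr (Or.inr ⟨rfl, by simp⟩))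
        have hlt : (0 : Nat) < n := by
          rw [← hn]; simp only [List.length_append, List.length_cons]; omega
        have := last_step sub hsub hnb l ['\r'] [] hl (by intro c hc; simp at hc; subst hc; rfl)
          (by simp) (by simpa using hsl)
          (fun w1 => IH 0 hlt [] rfl (by simp) w1) w0
        simpa using this
      · subst hr''
        by_cases h2 : b2 = '\n'
        · subst h2
          have hsl := splitlines_line l ['\r', '\n'] r'' hlb (Or.inr (Or.inl rfl))
          have hlt : r''.length < n := by
            rw [← hn]; simp only [List.length_append, List.length_cons]; omega
          have := last_step sub hsub hnb l ['\r', '\n'] r'' hl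
            (by intro c hc; simp at hc; rcases hc with rfl | rfl <;> rfl)
            (by simp) (by simpa using hsl)
            (fun w1 => IH r''.length hlt r'' rfl (fun c hc => hs c (by simp [hc])) w1) w0
          simpa using this
        · have hsl := splitlines_line l ['\r'] (b2 :: r'') hlb
            (Or.inr (Or.inr ⟨rfl, by simpa using h2⟩))
          have hlt : (b2 :: r'').length < n := by
            rw [← hn]; simp only [List.length_append, List.length_cons]; omega
          have := last_step sub hsub hnb l ['\r'] (b2 :: r'') hl
            (by intro c hc; simp at hc; subst hc; rfl)
            (by simp) (by simpa using hsl)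
            (fun w1 => IH (b2 :: r'').length hlt (b2 :: r'') rfl
              (fun c hc => hs c (by simp [hc])) w1) w0
          simpa using this

-- ### bridges between the String-level port A and the char level ###

theorem foldl_lines_toList (ndl : List Char) (L : List String) (S : String) :
    (L.foldl (fun w line => if PySem.Chars.isIn ndl line.toList then line else w) S).toList
      = (L.map String.toList).foldl (fun w l => if PySem.Chars.isIn ndl l then l else w) S.toList := by
  induction L generalizing S with
  | nil => rfl
  | cons a L ih => simp only [List.foldl_cons, List.map_cons]; split <;> simp [ih]

-- every character of str(n) is a digit or '-': never a line break
theorem digitChar_nonbrk (k : Nat) : pvNotBrk (Nat.digitChar k) = true := by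
  rcases Nat.lt_or_ge k 16 with h | h
  · interval_cases k <;> decide
  · have hstar : Nat.digitChar k = '*' := by
      unfold Nat.digitChar
      rw [if_neg (by omega), if_neg (by omega), if_neg (by omega), if_neg (by omega),
        if_neg (by omega), if_neg (by omega), if_neg (by omega), if_neg (by omega),
        if_neg (by omega), if_neg (by omega), if_neg (by omega), if_neg (by omega),
        if_neg (by omega), if_neg (by omega), if_neg (by omega), if_neg (by omega)]
    rw [hstar]
    decide

theorem toDigitsCore_nonbrk (b f : Nat) : ∀ (n : Nat) (acc : List Char),
    (∀ c ∈ acc, pvNotBrk c = true) → ∀ c ∈ Nat.toDigitsCore b f n acc, pvNotBrk c = true := by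
  induction f with
  | zero => intro n acc hacc; simpa [Nat.toDigitsCore] using hacc
  | succ f ih =>
    intro n acc hacc
    rw [Nat.toDigitsCore]
    split_ifs with h
    · intro c hc
      rcases List.mem_cons.mp hc with rfl | hc
      · exact digitChar_nonbrk _
      · exact hacc _ hc
    · refine ih _ _ ?_
      intro c hc
      rcases List.mem_cons.mp hc with rfl | hc
      · exact digitChar_nonbrk _
      · exact hacc _ hc

theorem toChars_nonbrk (n : Int) : ∀ c ∈ (PySem.Int.toStr n).toList, pvNotBrk c = true := by
  rw [PySem.Int.toList_toStr]
  unfold PySem.Int.toChars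
  split_ifs with h
  · intro c hc
    rcases List.mem_cons.mp hc with rfl | hc
    · rfl
    · exact toDigitsCore_nonbrk 10 _ _ [] (by simp) c (by rw [Nat.toDigits] at hc; exact hc)
  · intro c hc
    exact toDigitsCore_nonbrk 10 _ _ [] (by simp) c (by rw [Nat.toDigits] at hc; exact hc)

-- ===== VERDICT (by name: the statement is the Claim_ definition above) =====
theorem week_cal_spec : Claim_equal_week_cal := by
  intro cal n hdom _hpre
  unfold Spec_week_cal week_cal week_cal_alt
  dsimp only
  have hs : ∀ c ∈ cal.toList, pvDomChar c = true := by
    have h1 : pvDomStr cal = true := by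
      unfold Dom_week_cal at hdom
      rcases Bool.eq_false_or_eq_true (pvDomStr cal) with h | h
      · exact h
      · rw [h] at hdom; simp at hdom
    unfold pvDomStr at h1
    simpa [List.all_eq_true] using h1
  have hnlA : (">" ++ PySem.Int.toStr n ++ "<").toList
      = ['>'] ++ (PySem.Int.toStr n).toList ++ ['<'] := by
    rw [String.toList_append, String.toList_append]
    rfl
  set nl : List Char := ['>'] ++ (PySem.Int.toStr n).toList ++ ['<'] with hnl
  have hsub : nl ≠ [] := by simp [hnl]
  have hnb : ∀ c ∈ nl, pvNotBrk c = true := by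
    intro c hc
    rw [hnl] at hc
    rcases List.mem_append.mp hc with h1 | h2
    · rcases List.mem_append.mp h1 with h0 | ht
      · obtain rfl : c = '>' := by simpa using h0
        rfl
      · exact toChars_nonbrk n c ht
    · obtain rfl : c = '<' := by simpa using h2
      rfl
  have hW : ((PySem.Str.splitlines cal).foldl
        (fun w line => if PySem.Str.isIn (">" ++ PySem.Int.toStr n ++ "<") line then line else w) "")
      = (if PySem.Chars.rfind cal.toList nl < 0 then ""
         else String.ofList
           (((cal.toList.take (PySem.Chars.rfind cal.toList nl).toNat).reverse.takeWhile
               pvNotBrk).reverse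
             ++ (cal.toList.drop (PySem.Chars.rfind cal.toList nl).toNat).takeWhile pvNotBrk)) := by
    rw [← String.toList_inj]
    simp only [PySem.Str.isIn_eq, hnlA]
    rw [foldl_lines_toList nl (PySem.Str.splitlines cal) "",
      PySem.Str.splitlines_map_toList,
      lastline_eq_rfind nl hsub hnb cal.toList hs]
    rw [show ("" : String).toList = [] from rfl]
    simp only [rfind_lt_zero_iff]
    split_ifs with h
    · rfl
    · rw [String.toList_ofList]
      rfl
  rw [hW]
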